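-- pv_equiv track=rewrite | github.com/lamhn9999/jobs-vn | data_transform.py | time_transformation
-- ===== SOURCE A (Python) =====
-- def time_transformation(created_at, expired_str):
--     expired_at = ""
--     for index, ch in enumerate(expired_str):
--         if ch >= '0' and ch <= '9':
--             for i in range(index, len(expired_str)):
--                 if not (expired_str[i] >= '0' and expired_str[i] <= '9'):
--                     break
--                 expired_at += expired_str[i]
--             break
--     return(created_at, int(expired_at))
-- ===== SOURCE B (Python) =====
-- import re
--
-- def time_transformation(created_at, expired_str):
--     return (created_at, int(re.search(r'[0-9]+', expired_str).group()))
-- ===== Notes on version B (the rewrite author's own statement) =====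
-- stated objective: idiomatic
-- what changed: Replaces the nested index loops (outer scan for the first digit, inner indexed collection loop) with a single re.search for the first ASCII digit run.
import Mathlib
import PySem

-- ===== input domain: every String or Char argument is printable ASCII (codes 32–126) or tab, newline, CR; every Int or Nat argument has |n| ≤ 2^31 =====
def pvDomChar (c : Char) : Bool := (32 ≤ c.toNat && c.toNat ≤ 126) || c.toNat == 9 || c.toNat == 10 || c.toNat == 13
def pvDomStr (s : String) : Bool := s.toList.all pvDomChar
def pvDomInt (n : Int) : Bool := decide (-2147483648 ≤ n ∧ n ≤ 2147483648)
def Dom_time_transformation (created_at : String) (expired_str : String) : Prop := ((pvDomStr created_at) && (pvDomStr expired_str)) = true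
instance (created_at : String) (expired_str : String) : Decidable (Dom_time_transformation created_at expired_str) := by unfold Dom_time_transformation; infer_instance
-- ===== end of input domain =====

-- B replaces A's nested index loops with a single regex search for the first ASCII digit run (idiomatic; same cost).

-- ===== PORT A =====
-- inner loop: for i in range(index, len(expired_str)): collect while digit, break at first non-digit
def pvAInner : List Char → String → String
  | [], acc => acc
  | c :: rest, acc =>
    if ¬('0' ≤ c ∧ c ≤ '9') then acc else pvAInner rest (acc.push c)

-- outer loop: for index, ch in enumerate(expired_str): at first digit run the inner loop, then break
def pvAOuter : List Char → String
  | [] => ""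
  | c :: rest =>
    if '0' ≤ c ∧ c ≤ '9' then pvAInner (c :: rest) "" else pvAOuter rest

def time_transformation (created_at : String) (expired_str : String) : String × Int :=
  -- int(expired_at): ValueError (ofStr? = none) when no digit occurs; excluded by Pre_
  (created_at, (PySem.Int.ofStr? (pvAOuter expired_str.toList)).getD 0)

-- ===== PORT B =====
-- re.search(r'[0-9]+', s): drop up to the first ASCII digit, the match is the digit run there;
-- no match → AttributeError (ofStr? "" = none path shares getD 0; excluded by Pre_)
def time_transformation_alt (created_at : String) (expired_str : String) : String × Int :=
  let run := (expired_str.toList.dropWhile (fun c => ¬ c.isDigit)).takeWhile (fun c => c.isDigit)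
  (created_at, (PySem.Int.ofStr? (String.ofList run)).getD 0)

-- ===== PRECONDITION & SPEC =====
-- Pre_ excludes exactly the inputs where expired_str contains no ASCII digit: there A raises ValueError (int('')).
def Pre_time_transformation (created_at : String) (expired_str : String) : Prop :=
  expired_str.toList.any Char.isDigit = true
instance (created_at : String) (expired_str : String) : Decidable (Pre_time_transformation created_at expired_str) := by unfold Pre_time_transformation; infer_instance
def pvWitness_time_transformation : String × String := ("a", "x12y3")

def Spec_time_transformation (created_at : String) (expired_str : String) (out : String × Int) : Prop := out = time_transformation_alt created_at expired_str
instance (created_at : String) (expired_str : String) (out : String × Int) : Decidable (Spec_time_transformation created_at expired_str out) := by unfold Spec_time_transformation; infer_instance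

-- ===== CLAIM (what is proved, stated in full; the proofs are below) =====
def Claim_equal_time_transformation : Prop := ∀ (created_at : String) (expired_str : String), Dom_time_transformation created_at expired_str → Pre_time_transformation created_at expired_str → Spec_time_transformation created_at expired_str (time_transformation created_at expired_str)

-- ===== LEMMAS AND PROOFS =====

lemma pvDigit_iff (c : Char) : ('0' ≤ c ∧ c ≤ '9') ↔ c.isDigit = true := by
  simp [Char.isDigit, Char.le_def]

lemma pvAInner_eq (l : List Char) (acc : String) :
    pvAInner l acc = acc ++ String.ofList (l.takeWhile (fun c => c.isDigit)) := by
  induction l generalizing acc with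
  | nil =>
    apply String.toList_inj.mp
    simp [pvAInner]
  | cons c rest ih =>
    by_cases h : c.isDigit = true
    · rw [pvAInner, if_neg (by simp [pvDigit_iff, h]), ih]
      apply String.toList_inj.mp
      simp [h]
    · rw [pvAInner, if_pos (by simp [pvDigit_iff, h])]
      apply String.toList_inj.mp
      simp [h]

lemma pvAOuter_eq (l : List Char) :
    pvAOuter l = String.ofList ((l.dropWhile (fun c => ¬ c.isDigit)).takeWhile (fun c => c.isDigit)) := by
  induction l with
  | nil =>
    apply String.toList_inj.mp
    simp [pvAOuter]
  | cons c rest ih =>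
    by_cases h : c.isDigit = true
    · rw [pvAOuter, if_pos ((pvDigit_iff c).mpr h), pvAInner_eq]
      apply String.toList_inj.mp
      simp [h]
    · rw [pvAOuter, if_neg (by simp [pvDigit_iff, h]), ih]
      simp [h]

-- ===== VERDICT (by name: the statement is the Claim_ definition above) =====
theorem time_transformation_spec : Claim_equal_time_transformation := by
  intro created_at expired_str _ _
  unfold Spec_time_transformation time_transformation time_transformation_alt
  rw [pvAOuter_eq]
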